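-- pv_equiv track=rewrite | github.com/jlelia/python_tools | scripts/qr_gen_cli.py | _row_runs
-- ===== SOURCE A (Python) =====
-- from typing import Iterable, List, Sequence, Tuple
--
-- def _row_runs(row: Sequence[bool]) -> Iterable[Tuple[int, int]]:
-- 	start = None
-- 	for j, v in enumerate(row):
-- 		if v and start is None:
-- 			start = j
-- 		elif not v and start is not None:
-- 			yield (start, j - 1)
-- 			start = None
-- 	if start is not None:
-- 		yield (start, len(row) - 1)
-- ===== SOURCE B (Python) =====
-- from typing import Iterable, Sequence, Tuple
--
-- def _row_runs(row: Sequence[bool]) -> Iterable[Tuple[int, int]]: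
-- 	i, n = 0, len(row)
-- 	while i < n:
-- 		if row[i]:
-- 			j = i
-- 			while j < n and row[j]:
-- 				j += 1
-- 			yield (i, j - 1)
-- 			i = j
-- 		else:
-- 			i += 1
-- ===== Notes on version B (the rewrite author's own statement) =====
-- stated objective: alternative
-- what changed: Replaces A's start-sentinel state machine (one transition per element) with a two-pointer span scan that, on finding a True, advances an inner pointer to the end of the run and yields the span directly.
import Mathlib
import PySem

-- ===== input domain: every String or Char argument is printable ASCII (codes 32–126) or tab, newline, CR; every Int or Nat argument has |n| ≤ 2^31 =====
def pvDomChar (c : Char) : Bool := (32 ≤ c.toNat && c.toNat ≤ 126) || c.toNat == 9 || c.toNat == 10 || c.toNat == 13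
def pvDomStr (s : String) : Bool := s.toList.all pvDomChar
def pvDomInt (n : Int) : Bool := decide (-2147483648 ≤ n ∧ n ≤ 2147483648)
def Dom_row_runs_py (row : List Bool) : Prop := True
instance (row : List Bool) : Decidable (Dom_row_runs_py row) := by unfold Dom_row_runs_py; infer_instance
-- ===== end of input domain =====

-- B replaces A's start-sentinel state machine with a two-pointer span scan (alternative decomposition; return-value equivalence).

-- ===== PORT A =====
-- state machine: start = none/some s, j = current index
def aGo (start : Option Int) (j : Int) : List Bool → List (Int × Int)
  | [] =>
    match start with
    | some s => [(s, j - 1)]   -- final yield uses len(row)-1 = j-1 here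
    | none => []
  | v :: rest =>
    match start, v with
    | none, true => aGo (some j) (j + 1) rest
    | some s, false => (s, j - 1) :: aGo none (j + 1) rest
    | _, _ => aGo start (j + 1) rest

def row_runs_py (row : List Bool) : List (Int × Int) := aGo none 0 row

-- ===== PORT B =====
-- span scan: on a True at position i, the inner while advances to the end of the
-- run (ported as takeWhile/drop over the remaining list), yield the span, continue.
def altSpan (i : Int) : List Bool → List (Int × Int)
  | [] => []
  | false :: rest => altSpan (i + 1) rest
  | true :: rest =>
    let k := (rest.takeWhile (fun b => b)).length
    (i, i + k) :: altSpan (i + k + 1) (rest.drop k)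
termination_by l => l.length
decreasing_by
  all_goals (simp [List.length_drop]; try omega)

def row_runs_py_alt (row : List Bool) : List (Int × Int) := altSpan 0 row

-- ===== PRECONDITION & SPEC =====
def Spec_row_runs_py (row : List Bool) (out : List (Int × Int)) : Prop := out = row_runs_py_alt row
instance (row : List Bool) (out : List (Int × Int)) : Decidable (Spec_row_runs_py row out) := by unfold Spec_row_runs_py; infer_instance

-- ===== CLAIM (what is proved, stated in full; the proofs are below) =====
def Claim_equal_row_runs_py : Prop := ∀ (row : List Bool), Dom_row_runs_py row → Spec_row_runs_py row (row_runs_py row)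

-- ===== LEMMAS AND PROOFS =====
theorem altSpan_nil (i : Int) : altSpan i [] = [] := by rw [altSpan]
theorem altSpan_false (i : Int) (r : List Bool) :
    altSpan i (false :: r) = altSpan (i + 1) r := by rw [altSpan]
theorem altSpan_true (i : Int) (r : List Bool) :
    altSpan i (true :: r) =
      (i, i + ((r.takeWhile (fun b => b)).length : Int)) ::
        altSpan (i + ((r.takeWhile (fun b => b)).length : Int) + 1)
          (r.drop (r.takeWhile (fun b => b)).length) := by rw [altSpan]

-- after a maximal True-run, the next element (if any) is False and altSpan skips it
theorem stepFalse : ∀ (rest : List Bool) (m : Int),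
    altSpan m (rest.drop (rest.takeWhile (fun b => b)).length) =
    altSpan (m + 1) (rest.drop ((rest.takeWhile (fun b => b)).length + 1)) := by
  intro rest
  induction rest with
  | nil => intro m; simp [altSpan_nil]
  | cons b tl ih =>
    intro m
    cases b with
    | false => simp [List.takeWhile, altSpan_false]
    | true => simpa [List.takeWhile] using ih m

theorem key : ∀ (n : Nat) (l : List Bool), l.length ≤ n →
    (∀ j : Int, aGo none j l = altSpan j l) ∧
    (∀ (s j : Int), aGo (some s) j l =
      (s, j + ((l.takeWhile (fun b => b)).length : Int) - 1) ::
        altSpan (j + ((l.takeWhile (fun b => b)).length : Int) + 1)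
          (l.drop ((l.takeWhile (fun b => b)).length + 1))) := by
  intro n
  induction n with
  | zero =>
    intro l hl
    have : l = [] := by cases l <;> simp_all
    subst this
    exact ⟨fun j => by simp [aGo, altSpan_nil],
           fun s j => by simp [aGo, altSpan_nil]⟩
  | succ n ih =>
    intro l hl
    constructor
    · intro j
      match l with
      | [] => simp [aGo, altSpan_nil]
      | false :: rest =>
        have := (ih rest (by simp at hl; omega)).1
        simp [aGo, altSpan_false, this]
      | true :: rest =>
        have h2 := (ih rest (by simp at hl; omega)).2 j (j + 1)
        have hs := stepFalse rest (j + ((rest.takeWhile (fun b => b)).length : Int) + 1)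
        simp only [aGo, h2, altSpan_true]
        rw [hs]
        simp only [Prod.mk.injEq, List.cons.injEq]
        refine ⟨⟨trivial, by omega⟩, ?_⟩
        congr 1
        omega
    · intro s j
      match l with
      | [] => simp [aGo, altSpan_nil]
      | false :: rest =>
        have h1 := (ih rest (by simp at hl; omega)).1 (j + 1)
        simp [aGo, h1, List.takeWhile]
      | true :: rest =>
        have h2 := (ih rest (by simp at hl; omega)).2 s (j + 1)
        simp only [aGo, h2, List.takeWhile, List.drop_succ_cons]
        simp only [Prod.mk.injEq, List.cons.injEq, List.length_cons]
        push_cast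
        refine ⟨⟨trivial, by omega⟩, ?_⟩
        congr 1
        omega

-- ===== VERDICT (by name: the statement is the Claim_ definition above) =====
theorem row_runs_py_spec : Claim_equal_row_runs_py := by
  intro row _
  unfold Spec_row_runs_py row_runs_py row_runs_py_alt
  exact (key row.length row (le_refl _)).1 0
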